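-- pv_equiv track=rewrite | github.com/KS-Sh1n/21-1_Term_Project | main/scraper (old).py | extract_post_number
-- ===== SOURCE A (Python) =====
-- def extract_post_number(href, query):
--
--     href_postnum_list = []
--     href_postnum = 0
--     query_index = href.find(query)
--     search_start_index = query_index + len(query) + 1
--
--     for i in range(int(search_start_index), len(href)):
--         if href[i].isdigit():
--             # Temporary reversed list of post number
--             href_postnum_list.insert(0, int(href[i]))
--         else:
--             break
--
--     # Return ordered int from reversed list
--     for i in range(len(href_postnum_list)):
--         href_postnum += (href_postnum_list[i] * 10**i)
--
--     return href_postnum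
-- ===== SOURCE B (Python) =====
-- def extract_post_number(href, query):
--     start = href.find(query) + len(query) + 1
--     num = 0
--     for ch in href[start:]:
--         if not ch.isdigit():
--             break
--         num = num * 10 + (ord(ch) - 48)
--     return num
-- ===== Notes on version B (the rewrite author's own statement) =====
-- stated objective: simpler
-- what changed: Replaces A's index-driven two-phase computation (build a reversed digit list via insert(0) while indexing href, then a second loop summing digit*10**i) with a single pass over the characters of the slice href[start:], accumulating num = num*10 + digit; no index arithmetic and no intermediate list.
import Mathlib
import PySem

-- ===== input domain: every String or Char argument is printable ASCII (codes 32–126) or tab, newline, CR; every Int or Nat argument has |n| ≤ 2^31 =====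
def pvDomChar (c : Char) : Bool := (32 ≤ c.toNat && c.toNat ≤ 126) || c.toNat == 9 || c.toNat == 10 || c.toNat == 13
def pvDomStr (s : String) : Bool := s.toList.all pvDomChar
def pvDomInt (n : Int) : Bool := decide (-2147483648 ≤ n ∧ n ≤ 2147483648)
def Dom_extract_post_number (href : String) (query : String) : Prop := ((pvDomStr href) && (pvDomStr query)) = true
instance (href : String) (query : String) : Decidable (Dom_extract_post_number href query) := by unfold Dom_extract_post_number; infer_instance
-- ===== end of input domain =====

-- B replaces A's index-driven two-phase computation (reversed digit list, then positional sum)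
-- by a single character-level Horner pass over the slice href[start:]; objective: simpler.


-- ===== PORT A =====
-- first loop: 'for i in range(search_start_index, len(href)): if href[i].isdigit(): list.insert(0, int(href[i])) else: break'
-- every index drawn from the range is in bounds, so href[i] is read with pyGetD (default unreachable);
-- int(href[i]) on a digit char is its code minus 48
def pvACollect (s : List Char) (idxs : List Int) (acc : List Int) : List Int :=
  match idxs with
  | [] => acc
  | i :: rest =>
    let c := PySem.List.pyGetD s i ' '
    if PySem.Chars.isdigit c then
      pvACollect s rest (PySem.List.insert acc 0 ((c.toNat : Int) - 48))
    else acc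

def extract_post_number (href : String) (query : String) : Int :=
  let query_index := PySem.Str.find href query
  let search_start_index := query_index + PySem.Str.len query + 1
  let href_postnum_list :=
    pvACollect href.toList (PySem.List.pyRange search_start_index (PySem.Str.len href) 1) []
  -- second loop: 'for i in range(len(list)): num += list[i] * 10**i'
  (PySem.List.pyRange 0 (href_postnum_list.length : Int) 1).foldl
    (fun acc i => acc + (PySem.List.pyGetD href_postnum_list i 0) * 10 ^ i.toNat) 0

-- ===== PORT B =====
-- 'for ch in href[start:]: if not ch.isdigit(): break; num = num*10 + (ord(ch)-48)'
-- structural recursion over the characters of the slice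
def pvBHorner (cs : List Char) (num : Int) : Int :=
  match cs with
  | [] => num
  | c :: rest =>
    if PySem.Chars.isdigit c then pvBHorner rest (num * 10 + ((c.toNat : Int) - 48))
    else num

def extract_post_number_alt (href : String) (query : String) : Int :=
  let start := PySem.Str.find href query + PySem.Str.len query + 1
  pvBHorner (PySem.List.slice href.toList (some start) none) 0

-- ===== PRECONDITION & SPEC =====
def Spec_extract_post_number (href : String) (query : String) (out : Int) : Prop := out = extract_post_number_alt href query
instance (href : String) (query : String) (out : Int) : Decidable (Spec_extract_post_number href query out) := by unfold Spec_extract_post_number; infer_instance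

-- ===== CLAIM (what is proved, stated in full; the proofs are below) =====
def Claim_equal_extract_post_number : Prop := ∀ (href : String) (query : String), Dom_extract_post_number href query → Spec_extract_post_number href query (extract_post_number href query)

-- ===== LEMMAS AND PROOFS =====

-- 'lst.insert(0, x)' prepends
theorem pvInsert_zero (acc : List Int) (x : Int) : PySem.List.insert acc 0 x = x :: acc := by
  simp [PySem.List.insert, PySem.List.sliceIndices]

-- the accumulator of A's first loop only ever gets digits prepended
theorem pvACollect_acc (s : List Char) (idxs : List Int) (acc : List Int) :
    pvACollect s idxs acc = pvACollect s idxs [] ++ acc := by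
  induction idxs generalizing acc with
  | nil => simp [pvACollect]
  | cons i rest ih =>
    simp only [pvACollect, pvInsert_zero]
    split
    · rw [ih, ih [_]]
      simp
    · simp

theorem pvACollect_single (s : List Char) (idxs : List Int) (x : Int) :
    pvACollect s idxs [x] = pvACollect s idxs [] ++ [x] := pvACollect_acc s idxs [x]

-- B's character scan over the dropped suffix equals the Horner fold of the reverse of A's
-- collected (reversed) digit list
theorem pvBHorner_eq (s : List Char) (m : Nat) (a : Int) (n : Int) (ha : 0 ≤ a)
    (hm : s.length - a.toNat ≤ m) :
    pvBHorner (s.drop a.toNat) n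
      = (pvACollect s (PySem.List.pyRange a (s.length : Int) 1) []).reverse.foldl
          (fun x d => x * 10 + d) n := by
  induction m generalizing a n with
  | zero =>
    have hlen : (s.length : Int) ≤ a := by omega
    rw [PySem.List.pyRange_one_eq_nil hlen, List.drop_eq_nil_of_le (by omega)]
    simp [pvBHorner, pvACollect]
  | succ m ih =>
    by_cases hlt : a < (s.length : Int)
    · have hnat : a.toNat < s.length := by omega
      rw [PySem.List.pyRange_one_cons hlt, List.drop_eq_getElem_cons hnat]
      have hc : PySem.List.pyGetD s a ' ' = s[a.toNat] :=
        PySem.List.pyGetD_eq_getElem s ' ' ha (by omega)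
      simp only [pvACollect, pvBHorner, pvInsert_zero, hc]
      split
      · rw [pvACollect_single]
        have h1 : (a + 1).toNat = a.toNat + 1 := by omega
        rw [← h1, ih (a + 1) _ (by omega) (by omega)]
        simp
      · simp
    · have hlen : (s.length : Int) ≤ a := by omega
      rw [PySem.List.pyRange_one_eq_nil hlen, List.drop_eq_nil_of_le (by omega)]
      simp [pvBHorner, pvACollect]

-- positional sum Σ lst[k]·10^k equals the Horner fold of the reversed list
theorem pv_sum_eq_horner (lst : List Int) (n : Int) :
    ((List.range lst.length).map (fun k => lst.getD k 0 * 10 ^ k)).sum * 10 ^ 0 + n * 10 ^ lst.length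
      = (lst.reverse.foldl (fun a d => a * 10 + d) n) := by
  induction lst generalizing n with
  | nil => simp
  | cons d rest ih =>
    have h : List.range (rest.length + 1) = 0 :: (List.range rest.length).map (· + 1) := by
      simpa using @List.range_succ_eq_map rest.length
    simp only [List.length_cons, h, List.map_cons, List.map_map, List.sum_cons,
      List.reverse_cons, List.foldl_append, List.foldl_cons, List.foldl_nil]
    rw [← ih n]
    have hmap : (List.range rest.length).map ((fun k => (d :: rest).getD k 0 * 10 ^ k) ∘ (· + 1))
        = (List.range rest.length).map (fun k => rest.getD k 0 * 10 ^ k * 10) := by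
      apply List.map_congr_left
      intro k _
      simp only [Function.comp_apply, List.getD_cons_succ, pow_succ]
      ring
    rw [hmap, List.sum_map_mul_right]
    simp only [List.getD_cons_zero]
    ring

-- A's second loop, rewritten from the pyRange/pyGetD form to a plain positional sum
theorem pvA_second_loop (lst : List Int) :
    (PySem.List.pyRange 0 (lst.length : Int) 1).foldl
      (fun acc i => acc + (PySem.List.pyGetD lst i 0) * 10 ^ i.toNat) 0
    = ((List.range lst.length).map (fun k => lst.getD k 0 * 10 ^ k)).sum := by
  rw [PySem.List.foldl_add, PySem.List.pyRange_one]
  simp only [List.map_map, zero_add, sub_zero, Int.toNat_natCast]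
  congr 1
  apply List.map_congr_left
  intro k hk
  simp [PySem.List.pyGetD_natCast]

-- ===== VERDICT (by name: the statement is the Claim_ definition above) =====
theorem extract_post_number_spec : Claim_equal_extract_post_number := by
  intro href query _
  show _ = _
  unfold extract_post_number extract_post_number_alt
  simp only []
  have hstart : 0 ≤ PySem.Str.find href query + PySem.Str.len query + 1 := by
    have h1 : -1 ≤ PySem.Chars.find href.toList query.toList := PySem.Chars.neg_one_le_find _ _
    simp only [PySem.Str.find, PySem.Str.len]
    omega
  have hlen : PySem.Str.len href = (href.toList.length : Int) := by
    simp [PySem.Str.len]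
  rw [pvA_second_loop, PySem.List.slice_from href.toList hstart,
    pvBHorner_eq href.toList href.toList.length _ 0 hstart (by omega), hlen]
  have hfold := pv_sum_eq_horner
    (pvACollect href.toList
      (PySem.List.pyRange (PySem.Str.find href query + PySem.Str.len query + 1)
        ((href.toList.length : Int)) 1) []) 0
  simpa using hfold
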